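-- pv_equiv track=rewrite | github.com/pypi-data/pypi-mirror-373 | packages/jaygoga-orchestra/jaygoga_orchestra-1.0.1-py3-none-any.whl/jaygoga_orchestra/legacy/examples/blog_generation_team.py | extract_final_blog
-- ===== SOURCE A (Python) =====
-- def extract_final_blog(results):
--     """Extract the final blog post from team results."""
--     if not results or not results.get("task_results"):
--         return "No blog content generated."
--
--     # Get the last task result (should be the edited blog post)
--     task_results = results["task_results"]
--     final_task_result = None
--
--     for task_id, result in task_results.items():
--         if isinstance(result, dict) and result.get("agent_name") == "Content Editor":
--             final_task_result = result
--             break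
--
--     if not final_task_result:
--         # Fallback to any content
--         for task_id, result in task_results.items():
--             if isinstance(result, dict) and result.get("content"):
--                 final_task_result = result
--                 break
--
--     return final_task_result.get("content", "No content available") if final_task_result else "No content available"
-- ===== SOURCE B (Python) =====
-- def extract_final_blog(results):
--     """Extract the final blog post from team results (single pass)."""
--     if not results or not results.get("task_results"):
--         return "No blog content generated."
--
--     editor_result = None
--     content_result = None
--     for result in results["task_results"].values():
--         if not isinstance(result, dict):
--             continue
--         if editor_result is None and result.get("agent_name") == "Content Editor":
--             editor_result = result
--         if content_result is None and result.get("content"):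
--             content_result = result
--
--     final = editor_result if editor_result is not None else content_result
--     return final.get("content", "No content available") if final is not None else "No content available"
-- ===== Notes on version B (the rewrite author's own statement) =====
-- stated objective: simpler
-- what changed: Replaces A's two sequential scans (editor-first, then content fallback) by one pass over the values that records the first editor entry and the first truthy-content entry in two never-overwritten slots, choosing between them afterwards.
import Mathlib
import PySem

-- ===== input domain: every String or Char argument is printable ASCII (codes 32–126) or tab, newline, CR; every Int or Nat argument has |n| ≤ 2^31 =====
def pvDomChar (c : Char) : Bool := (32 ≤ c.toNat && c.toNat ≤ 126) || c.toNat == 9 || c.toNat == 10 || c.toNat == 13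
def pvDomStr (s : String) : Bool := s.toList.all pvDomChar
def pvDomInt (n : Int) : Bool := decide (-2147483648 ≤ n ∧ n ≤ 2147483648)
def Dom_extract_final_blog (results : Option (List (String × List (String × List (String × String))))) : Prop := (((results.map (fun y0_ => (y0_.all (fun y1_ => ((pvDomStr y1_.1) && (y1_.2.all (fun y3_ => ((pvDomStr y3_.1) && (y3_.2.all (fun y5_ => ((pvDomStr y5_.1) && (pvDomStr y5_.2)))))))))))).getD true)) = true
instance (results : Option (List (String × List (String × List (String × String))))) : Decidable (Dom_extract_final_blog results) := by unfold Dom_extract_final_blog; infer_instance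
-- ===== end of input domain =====

-- One honest line: B replaces A's two sequential scans by one pass keeping two
-- never-overwritten slots (first editor entry, first truthy-content entry); objective: simpler.

-- ===== PORT A =====
-- first loop: first value whose .get("agent_name") == "Content Editor" (first-match dict lookup)
def pvFindEditor : List (String × List (String × String)) → Option (List (String × String))
  | [] => none
  | (_, r) :: rest =>
    if r.lookup "agent_name" = some "Content Editor" then some r else pvFindEditor rest

-- second loop: first value with truthy result.get("content") (present and nonempty string)
def pvFindContent : List (String × List (String × String)) → Option (List (String × String))
  | [] => none
  | (_, r) :: rest =>
    match r.lookup "content" with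
    | some s => if s ≠ "" then some r else pvFindContent rest
    | none => pvFindContent rest

-- Python truthiness of an Optional[dict]: None and the empty dict are falsy
def pvFalsy (o : Option (List (String × String))) : Bool :=
  match o with
  | none => true
  | some r => r.isEmpty

def extract_final_blog (results : Option (List (String × List (String × List (String × String))))) : String :=
  match results with
  | none => "No blog content generated."            -- not results
  | some d =>
    if d.isEmpty then "No blog content generated."  -- not results (empty dict)
    else
      match d.lookup "task_results" with
      | none => "No blog content generated."        -- not results.get("task_results")
      | some task_results =>
        if task_results.isEmpty then "No blog content generated."
        else
          let ftr0 := pvFindEditor task_results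
          let ftr := if pvFalsy ftr0 then pvFindContent task_results else ftr0
          match ftr with
          | none => "No content available"
          | some r =>
            if r.isEmpty then "No content available"          -- falsy final_task_result
            else (r.lookup "content").getD "No content available"

-- ===== PORT B =====
-- one fold step: fill each slot only when still empty
def pvStep (st : Option (List (String × String)) × Option (List (String × String)))
    (kv : String × List (String × String)) :
    Option (List (String × String)) × Option (List (String × String)) :=
  ( if st.1 = none ∧ kv.2.lookup "agent_name" = some "Content Editor" then some kv.2 else st.1,
    if st.2 = none ∧ (kv.2.lookup "content").getD "" ≠ "" then some kv.2 else st.2 )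

def extract_final_blog_alt (results : Option (List (String × List (String × List (String × String))))) : String :=
  match results with
  | none => "No blog content generated."
  | some d =>
    if d.isEmpty then "No blog content generated."
    else
      match d.lookup "task_results" with
      | none => "No blog content generated."
      | some task_results =>
        if task_results.isEmpty then "No blog content generated."
        else
          let st := task_results.foldl pvStep (none, none)
          let final := if st.1.isSome then st.1 else st.2
          match final with
          | none => "No content available"
          | some r => (r.lookup "content").getD "No content available"

-- ===== PRECONDITION & SPEC =====
def Spec_extract_final_blog (results : Option (List (String × List (String × List (String × String))))) (out : String) : Prop := out = extract_final_blog_alt results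
instance (results : Option (List (String × List (String × List (String × String))))) (out : String) : Decidable (Spec_extract_final_blog results out) := by unfold Spec_extract_final_blog; infer_instance

-- ===== CLAIM (what is proved, stated in full; the proofs are below) =====
def Claim_equal_extract_final_blog : Prop := ∀ (results : Option (List (String × List (String × List (String × String))))), Dom_extract_final_blog results → Spec_extract_final_blog results (extract_final_blog results)

-- ===== LEMMAS AND PROOFS =====

-- the fold computes exactly "first editor" and "first truthy content", slots never overwritten
theorem foldl_pvStep (tr : List (String × List (String × String)))
    (e c : Option (List (String × String))) :
    tr.foldl pvStep (e, c) =
      ((match e with | none => pvFindEditor tr | some x => some x),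
       (match c with | none => pvFindContent tr | some x => some x)) := by
  induction tr generalizing e c with
  | nil => cases e <;> cases c <;> simp [pvFindEditor, pvFindContent]
  | cons hd tl ih =>
    simp only [List.foldl_cons, pvStep]
    rw [ih]
    cases hl : (hd.2.lookup "content") with
    | none =>
      cases e <;> cases c <;> simp [pvFindEditor, pvFindContent, hl] <;> split_ifs <;> rfl
    | some s =>
      by_cases hs : s = "" <;>
        cases e <;> cases c <;> simp [pvFindEditor, pvFindContent, hl, hs] <;> split_ifs <;> rfl

-- an editor hit contains the "agent_name" key, hence is nonempty
theorem pvFindEditor_ne_nil (tr : List (String × List (String × String)))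
    (r : List (String × String)) (h : pvFindEditor tr = some r) : r ≠ [] := by
  induction tr with
  | nil => simp [pvFindEditor] at h
  | cons hd tl ih =>
    simp only [pvFindEditor] at h
    split_ifs at h with hc
    · cases h
      intro hnil
      rw [hnil] at hc
      simp at hc
    · exact ih h

-- a content hit has a nonempty "content" value, hence is nonempty
theorem pvFindContent_spec (tr : List (String × List (String × String)))
    (r : List (String × String)) (h : pvFindContent tr = some r) :
    ∃ s, r.lookup "content" = some s ∧ s ≠ "" := by
  induction tr with
  | nil => simp [pvFindContent] at h
  | cons hd tl ih =>
    simp only [pvFindContent] at h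
    cases hl : (hd.2.lookup "content") with
    | none => rw [hl] at h; exact ih h
    | some s =>
      rw [hl] at h
      by_cases hs : s = ""
      · simp [hs] at h; exact ih h
      · simp [hs] at h; subst h; exact ⟨s, hl, hs⟩

-- ===== VERDICT (by name: the statement is the Claim_ definition above) =====
theorem extract_final_blog_spec : Claim_equal_extract_final_blog := by
  intro results _
  unfold Spec_extract_final_blog extract_final_blog extract_final_blog_alt
  cases results with
  | none => rfl
  | some d =>
    simp only
    by_cases hd : d.isEmpty = true
    · simp [hd]
    · simp only [if_neg hd]
      cases hl : d.lookup "task_results" with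
      | none => rfl
      | some tr =>
        simp only
        by_cases htr : tr.isEmpty = true
        · simp [htr]
        · simp only [if_neg htr, foldl_pvStep]
          cases he : pvFindEditor tr with
          | some r =>
            have hne := pvFindEditor_ne_nil tr r he
            simp [pvFalsy, List.isEmpty_iff, hne]
          | none =>
            cases hc : pvFindContent tr with
            | none => simp [pvFalsy]
            | some r =>
              obtain ⟨s, hs, hsne⟩ := pvFindContent_spec tr r hc
              have hne : r ≠ [] := by intro h; rw [h] at hs; simp at hs
              simp [pvFalsy, List.isEmpty_iff, hne]
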